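-- pv_equiv track=rewrite | github.com/qiulin/hirag-haystack | hirag_haystack/api/streaming.py | _split_preserving_whitespace
-- ===== SOURCE A (Python) =====
-- def _split_preserving_whitespace(text: str) -> list[str]:
--     """Split text into words while preserving leading/trailing whitespace.
--
--     This ensures the reconstructed text matches the original exactly.
--
--     Args:
--         text: Text to split.
--
--     Returns:
--         List of word tokens with appropriate spacing.
--     """
--     if not text:
--         return []
--
--     result = []
--     current_word = ""
--     in_whitespace = text[0].isspace() if text else False
--
--     for char in text:
--         is_space = char.isspace()
--         if is_space == in_whitespace:
--             current_word += char
--         else: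
--             if current_word:
--                 result.append(current_word)
--             current_word = char
--             in_whitespace = is_space
--
--     if current_word:
--         result.append(current_word)
--
--     # Combine words with their following whitespace for better streaming UX
--     combined = []
--     i = 0
--     while i < len(result):
--         token = result[i]
--         # If this is a word (not whitespace) and next token is whitespace, combine
--         if not token[0].isspace() and i + 1 < len(result) and result[i + 1][0].isspace():
--             combined.append(token + result[i + 1])
--             i += 2
--         else:
--             combined.append(token)
--             i += 1
--
--     return combined if combined else [text]
-- ===== SOURCE B (Python) =====
-- def _split_preserving_whitespace(text: str) -> list[str]:
--     """Single pass over run boundaries: emit each word together with the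
--     whitespace run that follows it; a leading whitespace run is its own token."""
--     tokens = []
--     i, n = 0, len(text)
--     while i < n:
--         j = i
--         if text[j].isspace():
--             while j < n and text[j].isspace():
--                 j += 1
--         else:
--             while j < n and not text[j].isspace():
--                 j += 1
--             while j < n and text[j].isspace():
--                 j += 1
--         tokens.append(text[i:j])
--         i = j
--     return tokens
-- ===== Notes on version B (the rewrite author's own statement) =====
-- stated objective: alternative
-- what changed: Replaces A's two passes (a character-by-character state machine building run strings, then a while loop combining word tokens with following whitespace tokens) with a single pass over run boundaries that slices each word together with its trailing whitespace run directly.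
import Mathlib
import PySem

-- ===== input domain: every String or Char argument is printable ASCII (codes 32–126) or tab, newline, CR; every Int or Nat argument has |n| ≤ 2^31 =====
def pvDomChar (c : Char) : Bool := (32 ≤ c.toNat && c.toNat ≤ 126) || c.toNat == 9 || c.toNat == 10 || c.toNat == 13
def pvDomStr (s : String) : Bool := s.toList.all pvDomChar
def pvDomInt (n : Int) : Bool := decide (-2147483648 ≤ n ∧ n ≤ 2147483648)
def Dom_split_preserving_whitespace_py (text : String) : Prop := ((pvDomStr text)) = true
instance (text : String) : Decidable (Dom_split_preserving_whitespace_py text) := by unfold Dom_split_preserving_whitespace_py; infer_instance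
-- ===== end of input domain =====

-- B replaces A's two passes (character state machine + token-combining while loop) by one
-- pass over run boundaries that slices each word together with its following whitespace run
-- directly (objective: alternative single-pass algorithm of similar cost).

-- ===== PORT A =====
-- the for-loop: state (result, current_word, in_whitespace), one step per character
def pvALoop (res : List (List Char)) (cur : List Char) (inws : Bool) :
    List Char → List (List Char) × List Char
  | [] => (res, cur)
  | c :: cs =>
      if PySem.Chars.isspace c == inws then pvALoop res (cur ++ [c]) inws cs
      else pvALoop (if cur = [] then res else res ++ [cur]) [c] (PySem.Chars.isspace c) cs

-- the post-loop flush: "if current_word: result.append(current_word)"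
def pvAFinish (p : List (List Char) × List Char) : List (List Char) :=
  if p.2 = [] then p.1 else p.1 ++ [p.2]

-- "token[0].isspace()" (tokens are never empty in A; [] gives false here)
def pvStartsSpace (t : List Char) : Bool :=
  match t with
  | [] => false
  | c :: _ => PySem.Chars.isspace c

-- the combining while loop over the token list
def pvCombine : List (List Char) → List (List Char)
  | [] => []
  | [t] => [t]
  | t :: u :: rest =>
      if !pvStartsSpace t && pvStartsSpace u then (t ++ u) :: pvCombine rest
      else t :: pvCombine (u :: rest)

def split_preserving_whitespace_py (text : String) : List String :=
  match text.toList with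
  | [] => []
  | c :: cs =>
      let res := pvAFinish (pvALoop [] [] (pvStartsSpace (c :: cs)) (c :: cs))
      let comb := pvCombine res
      if comb = [] then [text] else comb.map String.mk

-- ===== PORT B =====
-- one pass: a leading whitespace run is a token; a word run grabs the whitespace run after it
def pvBGo : List Char → List (List Char)
  | [] => []
  | c :: cs =>
      if PySem.Chars.isspace c then
        (c :: cs.takeWhile (fun d => PySem.Chars.isspace d)) ::
          pvBGo (cs.dropWhile (fun d => PySem.Chars.isspace d))
      else
        let rest := cs.dropWhile (fun d => !PySem.Chars.isspace d)
        (c :: (cs.takeWhile (fun d => !PySem.Chars.isspace d) ++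
               rest.takeWhile (fun d => PySem.Chars.isspace d))) ::
          pvBGo (rest.dropWhile (fun d => PySem.Chars.isspace d))
termination_by l => l.length
decreasing_by
  · simpa using Nat.lt_succ_of_le (cs.length_dropWhile_le _)
  · exact Nat.lt_succ_of_le (le_trans (List.length_dropWhile_le _ _)
      (cs.length_dropWhile_le _))

def split_preserving_whitespace_py_alt (text : String) : List String :=
  (pvBGo text.toList).map String.mk

-- ===== PRECONDITION & SPEC =====
def Spec_split_preserving_whitespace_py (text : String) (out : List String) : Prop := out = split_preserving_whitespace_py_alt text
instance (text : String) (out : List String) : Decidable (Spec_split_preserving_whitespace_py text out) := by unfold Spec_split_preserving_whitespace_py; infer_instance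

-- ===== CLAIM (what is proved, stated in full; the proofs are below) =====
def Claim_equal_split_preserving_whitespace_py : Prop := ∀ (text : String), Dom_split_preserving_whitespace_py text → Spec_split_preserving_whitespace_py text (split_preserving_whitespace_py text)

-- ===== LEMMAS AND PROOFS =====

-- maximal-run decomposition: the common characterisation both ports are reduced to
def pvRuns : List Char → List (List Char)
  | [] => []
  | c :: cs =>
      (c :: cs.takeWhile (fun d => PySem.Chars.isspace d == PySem.Chars.isspace c)) ::
        pvRuns (cs.dropWhile (fun d => PySem.Chars.isspace d == PySem.Chars.isspace c))
termination_by l => l.length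
decreasing_by
  simpa using Nat.lt_succ_of_le (cs.length_dropWhile_le _)

theorem pvRuns_all (c : Char) (cs : List Char)
    (h : ∀ d ∈ cs, PySem.Chars.isspace d = PySem.Chars.isspace c) :
    pvRuns (c :: cs) = [c :: cs] := by
  rw [pvRuns]
  rw [List.takeWhile_eq_self_iff.mpr (by intro d hd; simp [h d hd]),
      List.dropWhile_eq_nil_iff.mpr (by intro d hd; simp [h d hd]), pvRuns]

theorem pvTake_app {p : Char → Bool} (cs : List Char) (c2 : Char) (l2 : List Char)
    (h : ∀ d ∈ cs, p d = true) (h2 : p c2 = false) :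
    (cs ++ c2 :: l2).takeWhile p = cs := by
  induction cs with
  | nil => simp [h2]
  | cons a as ih =>
      simp [h a (by simp), ih (fun d hd => h d (by simp [hd]))]

theorem pvDrop_app {p : Char → Bool} (cs : List Char) (c2 : Char) (l2 : List Char)
    (h : ∀ d ∈ cs, p d = true) (h2 : p c2 = false) :
    (cs ++ c2 :: l2).dropWhile p = c2 :: l2 := by
  induction cs with
  | nil => simp [h2]
  | cons a as ih =>
      simp [h a (by simp), ih (fun d hd => h d (by simp [hd]))]

theorem pvRuns_break (c : Char) (cs : List Char) (c2 : Char) (l2 : List Char)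
    (h : ∀ d ∈ cs, PySem.Chars.isspace d = PySem.Chars.isspace c)
    (h2 : PySem.Chars.isspace c2 ≠ PySem.Chars.isspace c) :
    pvRuns (c :: (cs ++ c2 :: l2)) = (c :: cs) :: pvRuns (c2 :: l2) := by
  rw [pvRuns, pvTake_app cs c2 l2 (by intro d hd; simp [h d hd]) (by simp [h2]),
      pvDrop_app cs c2 l2 (by intro d hd; simp [h d hd]) (by simp [h2])]

theorem pvDropWhile_head {p : Char → Bool} :
    ∀ (l : List Char) (d : Char) (ds : List Char), l.dropWhile p = d :: ds → p d = false := by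
  intro l
  induction l with
  | nil => intro d ds h; simp [List.dropWhile] at h
  | cons a as ih =>
      intro d ds h
      rw [List.dropWhile_cons] at h
      by_cases ha : p a = true
      · rw [if_pos ha] at h; exact ih d ds h
      · rw [if_neg ha] at h
        injection h with h1 _
        subst h1
        simpa using ha

theorem pvALoop_runs : ∀ (l : List Char) (res : List (List Char)) (c0 : Char)
    (cur0 : List Char) (inws : Bool),
    (∀ d ∈ c0 :: cur0, PySem.Chars.isspace d = inws) →
    pvAFinish (pvALoop res (c0 :: cur0) inws l) = res ++ pvRuns ((c0 :: cur0) ++ l) := by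
  intro l
  induction l with
  | nil =>
      intro res c0 cur0 inws h
      have hc0 : PySem.Chars.isspace c0 = inws := h c0 (by simp)
      rw [List.append_nil, pvRuns_all c0 cur0 (fun d hd => by rw [h d (by simp [hd]), hc0])]
      simp [pvALoop, pvAFinish]
  | cons c cs ih =>
      intro res c0 cur0 inws h
      have hc0 : PySem.Chars.isspace c0 = inws := h c0 (by simp)
      rw [pvALoop]
      by_cases hc : PySem.Chars.isspace c = inws
      · rw [if_pos (by simp [hc])]
        have h' : ∀ d ∈ c0 :: (cur0 ++ [c]), PySem.Chars.isspace d = inws := by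
          intro d hd
          rcases List.mem_cons.mp hd with h1 | h1
          · subst h1; exact hc0
          · rcases List.mem_append.mp h1 with h2 | h2
            · exact h d (by simp [h2])
            · simp at h2; subst h2; exact hc
        have := ih res c0 (cur0 ++ [c]) inws h'
        simpa [List.append_assoc] using this
      · rw [if_neg (by simp [hc]), if_neg (by simp)]
        have := ih (res ++ [c0 :: cur0]) c [] (PySem.Chars.isspace c) (by simp)
        rw [List.cons_append, pvRuns_break c0 cur0 c cs
              (fun d hd => by rw [h d (by simp [hd]), hc0]) (by rw [hc0]; exact hc)]
        simpa [List.append_assoc] using this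

theorem pvCombine_cons_space (t : List Char) (R : List (List Char))
    (h : pvStartsSpace t = true) : pvCombine (t :: R) = t :: pvCombine R := by
  match R with
  | [] => simp [pvCombine]
  | u :: rest => rw [pvCombine]; simp [h]

theorem pvCombine_runs : ∀ (n : Nat) (l : List Char), l.length ≤ n →
    pvCombine (pvRuns l) = pvBGo l := by
  intro n
  induction n with
  | zero =>
      intro l hl
      have : l = [] := List.eq_nil_of_length_eq_zero (Nat.le_zero.mp hl)
      subst this; simp [pvRuns, pvBGo, pvCombine]
  | succ n ih =>
      intro l hl
      match l with
      | [] => simp [pvRuns, pvBGo, pvCombine]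
      | c :: cs =>
        have hcs : cs.length ≤ n := Nat.succ_le_succ_iff.mp hl
        by_cases hc : PySem.Chars.isspace c = true
        · have hp : (fun d => PySem.Chars.isspace d == PySem.Chars.isspace c)
              = (fun d => PySem.Chars.isspace d) := by funext d; simp [hc]
          rw [pvRuns, pvBGo, if_pos hc, hp,
            pvCombine_cons_space _ _ (by simp [pvStartsSpace, hc]),
            ih (cs.dropWhile (fun d => PySem.Chars.isspace d))
              (le_trans (cs.length_dropWhile_le _) hcs)]
        · have hc' : PySem.Chars.isspace c = false := by simpa using hc
          have hp : (fun d => PySem.Chars.isspace d == PySem.Chars.isspace c)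
              = (fun d => !PySem.Chars.isspace d) := by funext d; simp [hc']
          rw [pvRuns, pvBGo, if_neg (by simp [hc']), hp]
          cases hrest : cs.dropWhile (fun d => !PySem.Chars.isspace d) with
          | nil => simp [pvRuns, pvBGo, pvCombine]
          | cons d ds =>
              have hd : PySem.Chars.isspace d = true := by
                have := pvDropWhile_head cs d ds hrest
                simpa using this
              have hlen : ds.length < cs.length := by
                have h1 := cs.length_dropWhile_le (fun d => !PySem.Chars.isspace d)
                rw [hrest] at h1
                simp at h1; omega
              rw [pvRuns, hd]
              have hps : (fun e => PySem.Chars.isspace e == true)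
                  = (fun e => PySem.Chars.isspace e) := by funext e; simp
              rw [hps, pvCombine]
              rw [if_pos (by simp [pvStartsSpace, hc', hd])]
              rw [ih (ds.dropWhile (fun e => PySem.Chars.isspace e))
                  (le_trans (ds.length_dropWhile_le _) (by omega))]
              simp [hd]

theorem pvBGo_cons_ne_nil (c : Char) (cs : List Char) : pvBGo (c :: cs) ≠ [] := by
  rw [pvBGo]; split <;> simp

-- ===== VERDICT (by name: the statement is the Claim_ definition above) =====
theorem split_preserving_whitespace_py_spec : Claim_equal_split_preserving_whitespace_py := by
  intro text _
  unfold Spec_split_preserving_whitespace_py split_preserving_whitespace_py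
    split_preserving_whitespace_py_alt
  cases h : text.toList with
  | nil => simp [pvBGo]
  | cons c cs =>
      simp only
      rw [pvALoop]
      simp only [pvStartsSpace, beq_self_eq_true, if_true, List.nil_append]
      rw [pvALoop_runs cs [] c [] (PySem.Chars.isspace c) (by simp), List.nil_append,
        List.singleton_append, pvCombine_runs (c :: cs).length (c :: cs) le_rfl,
        if_neg (pvBGo_cons_ne_nil c cs)]
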